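-- pv_equiv track=rewrite | github.com/luk036/wave-diff | experiments/diff_tool.py | simple_diff
-- ===== SOURCE A (Python) =====
-- def simple_diff(file1_content, file2_content, file1_name="file1", file2_name="file2"):
--     """Simple character-by-character diff showing differences with markers"""
--     lines1 = file1_content.splitlines(keepends=True)
--     lines2 = file2_content.splitlines(keepends=True)
--
--     result = []
--     i, j = 0, 0
--
--     while i < len(lines1) or j < len(lines2):
--         if i < len(lines1) and j < len(lines2):
--             if lines1[i] == lines2[j]:
--                 result.append(f"  {lines1[i].rstrip()}")
--                 i += 1
--                 j += 1
--             else: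
--                 result.append(f"- {lines1[i].rstrip()}")
--                 result.append(f"+ {lines2[j].rstrip()}")
--                 i += 1
--                 j += 1
--         elif i < len(lines1):
--             result.append(f"- {lines1[i].rstrip()}")
--             i += 1
--         else:
--             result.append(f"+ {lines2[j].rstrip()}")
--             j += 1
--
--     return "\n".join(result)
-- ===== SOURCE B (Python) =====
-- def simple_diff(file1_content, file2_content, file1_name="file1", file2_name="file2"):
--     """Divide-and-conquer diff: since the markers are purely positional, the diff of
--     two line lists is the diff of their aligned halves concatenated, so recurse by
--     splitting both lists at the midpoint of the common length."""
--     def go(l1, l2):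
--         if not l1:
--             return ["+ " + l.rstrip() for l in l2]
--         if not l2:
--             return ["- " + l.rstrip() for l in l1]
--         m = min(len(l1), len(l2))
--         if m == 1:
--             x, y = l1[0], l2[0]
--             head = ["  " + x.rstrip()] if x == y else ["- " + x.rstrip(), "+ " + y.rstrip()]
--             return head + go(l1[1:], l2[1:])
--         k = m // 2
--         return go(l1[:k], l2[:k]) + go(l1[k:], l2[k:])
--     return "\n".join(go(file1_content.splitlines(keepends=True),
--                         file2_content.splitlines(keepends=True)))
-- ===== Notes on version B (the rewrite author's own statement) =====
-- stated objective: alternative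
-- what changed: Replaces the indexed while-loop with a divide-and-conquer recursion that splits both line lists at the midpoint of their common length (valid because the markers are purely positional, so the diff is compositional under aligned splits), with empty-side and single-pair base cases.
import Mathlib
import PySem

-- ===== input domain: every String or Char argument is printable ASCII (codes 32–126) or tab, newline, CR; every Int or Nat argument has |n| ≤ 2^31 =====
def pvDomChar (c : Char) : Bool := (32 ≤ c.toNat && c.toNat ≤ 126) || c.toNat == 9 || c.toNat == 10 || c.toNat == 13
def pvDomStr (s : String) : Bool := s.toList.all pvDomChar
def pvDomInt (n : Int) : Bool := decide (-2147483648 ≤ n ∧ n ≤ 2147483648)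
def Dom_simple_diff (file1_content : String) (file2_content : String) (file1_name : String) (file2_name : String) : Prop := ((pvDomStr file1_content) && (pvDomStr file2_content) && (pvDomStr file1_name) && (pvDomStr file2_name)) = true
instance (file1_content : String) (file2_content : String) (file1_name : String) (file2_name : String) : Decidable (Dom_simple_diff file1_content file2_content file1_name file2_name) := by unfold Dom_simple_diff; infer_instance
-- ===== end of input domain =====

-- B replaces A's indexed while-loop with a divide-and-conquer recursion splitting both line lists at the midpoint of the common length; same output, similar cost.


-- ===== PORT A =====
-- splitlines(keepends=True): PySem has only the keepends=False form, so this is a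
-- hand port, exact on Dom's character set (printable ASCII, tab, '\n', '\r'):
-- line breaks there are exactly '\n', '\r' and the pair '\r\n'.
def pvSplitKeepAux : List Char → List Char → List String
  | cur, [] => if cur = [] then [] else [String.mk cur.reverse]
  | cur, '\r' :: '\n' :: rest => String.mk (cur.reverse ++ ['\r', '\n']) :: pvSplitKeepAux [] rest
  | cur, '\r' :: rest => String.mk (cur.reverse ++ ['\r']) :: pvSplitKeepAux [] rest
  | cur, '\n' :: rest => String.mk (cur.reverse ++ ['\n']) :: pvSplitKeepAux [] rest
  | cur, c :: rest => pvSplitKeepAux (c :: cur) rest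
  termination_by _ rest => rest.length

def pvSplitKeep (s : String) : List String := pvSplitKeepAux [] s.toList

-- A's while-loop over indices i, j: both indices always advance with the suffixes,
-- so the loop is the obvious recursion on the two remaining-line lists.
def pvLoopA : List String → List String → List String
  | x :: xs, y :: ys =>
      if x = y then ("  " ++ PySem.Str.rstrip x) :: pvLoopA xs ys
      else ("- " ++ PySem.Str.rstrip x) :: ("+ " ++ PySem.Str.rstrip y) :: pvLoopA xs ys
  | x :: xs, [] => ("- " ++ PySem.Str.rstrip x) :: pvLoopA xs []
  | [], y :: ys => ("+ " ++ PySem.Str.rstrip y) :: pvLoopA [] ys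
  | [], [] => []

def simple_diff (file1_content : String) (file2_content : String) (file1_name : String) (file2_name : String) : String :=
  PySem.Str.join "\n" (pvLoopA (pvSplitKeep file1_content) (pvSplitKeep file2_content))

-- ===== PORT B =====
-- B's divide-and-conquer helper `go`: empty-side base cases, a single-pair base
-- case, and a split of both lists at the midpoint of the common length.
def pvGo (l1 l2 : List String) : List String :=
  if h1 : l1 = [] then l2.map (fun l => "+ " ++ PySem.Str.rstrip l)
  else if h2 : l2 = [] then l1.map (fun l => "- " ++ PySem.Str.rstrip l)
  else
    let m := min l1.length l2.length
    if hm : m = 1 then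
      (if l1.head! = l2.head! then ["  " ++ PySem.Str.rstrip l1.head!]
       else ["- " ++ PySem.Str.rstrip l1.head!, "+ " ++ PySem.Str.rstrip l2.head!]) ++
      pvGo (l1.drop 1) (l2.drop 1)
    else
      let k := m / 2
      pvGo (l1.take k) (l2.take k) ++ pvGo (l1.drop k) (l2.drop k)
  termination_by l1.length + l2.length
  decreasing_by
  · have a1 : 0 < l1.length := List.length_pos_iff.mpr h1
    have a2 : 0 < l2.length := List.length_pos_iff.mpr h2
    simp only [List.length_drop]; omega
  · have a1 : 0 < l1.length := List.length_pos_iff.mpr h1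
    have a2 : 0 < l2.length := List.length_pos_iff.mpr h2
    simp only [List.length_take]; omega
  · have a1 : 0 < l1.length := List.length_pos_iff.mpr h1
    have a2 : 0 < l2.length := List.length_pos_iff.mpr h2
    simp only [List.length_drop]; omega

def simple_diff_alt (file1_content : String) (file2_content : String) (file1_name : String) (file2_name : String) : String :=
  PySem.Str.join "\n" (pvGo (pvSplitKeep file1_content) (pvSplitKeep file2_content))

-- ===== PRECONDITION & SPEC =====
def Spec_simple_diff (file1_content : String) (file2_content : String) (file1_name : String) (file2_name : String) (out : String) : Prop := out = simple_diff_alt file1_content file2_content file1_name file2_name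
instance (file1_content : String) (file2_content : String) (file1_name : String) (file2_name : String) (out : String) : Decidable (Spec_simple_diff file1_content file2_content file1_name file2_name out) := by unfold Spec_simple_diff; infer_instance

-- ===== CLAIM (what is proved, stated in full; the proofs are below) =====
def Claim_equal_simple_diff : Prop := ∀ (file1_content : String) (file2_content : String) (file1_name : String) (file2_name : String), Dom_simple_diff file1_content file2_content file1_name file2_name → Spec_simple_diff file1_content file2_content file1_name file2_name (simple_diff file1_content file2_content file1_name file2_name)

-- ===== LEMMAS AND PROOFS =====

theorem pvLoopA_nil_left (ys : List String) :
    pvLoopA [] ys = ys.map (fun l => "+ " ++ PySem.Str.rstrip l) := by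
  induction ys with
  | nil => simp [pvLoopA]
  | cons y ys ih => simp [pvLoopA, ih]

theorem pvLoopA_nil_right (xs : List String) :
    pvLoopA xs [] = xs.map (fun l => "- " ++ PySem.Str.rstrip l) := by
  induction xs with
  | nil => simp [pvLoopA]
  | cons x xs ih => simp [pvLoopA, ih]

-- Compositionality of the aligned diff: it splits over aligned splits.
theorem pvLoopA_append (a c : List String) (b d : List String)
    (h : a.length = c.length) :
    pvLoopA (a ++ b) (c ++ d) = pvLoopA a c ++ pvLoopA b d := by
  induction a generalizing c with
  | nil => cases c with
    | nil => simp [pvLoopA]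
    | cons _ _ => simp at h
  | cons x xs ih =>
    cases c with
    | nil => simp at h
    | cons y ys =>
      simp only [List.length_cons, Nat.add_right_cancel_iff] at h
      simp only [List.cons_append, pvLoopA]
      split_ifs <;> simp [ih ys h]

-- B's divide-and-conquer computes A's aligned diff.
theorem pvGo_eq (l1 l2 : List String) : pvGo l1 l2 = pvLoopA l1 l2 := by
  induction l1, l2 using pvGo.induct with
  | case1 l2 => simp [pvGo, pvLoopA_nil_left]
  | case2 l1 h1 => simp [pvGo, h1, pvLoopA_nil_right]
  | case3 l1 l2 h1 h2 m hm ih =>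
    obtain ⟨x, xs, rfl⟩ := List.exists_cons_of_ne_nil h1
    obtain ⟨y, ys, rfl⟩ := List.exists_cons_of_ne_nil h2
    simp only [List.drop_one, List.tail_cons] at ih
    have hm' : min (x :: xs).length (y :: ys).length = 1 := hm
    rw [pvGo]
    simp only [dif_neg h1, dif_neg h2, dif_pos hm', List.head!_cons, List.drop_one,
      List.tail_cons, ih, pvLoopA]
    split_ifs <;> simp
  | case4 l1 l2 h1 h2 m hm k ih1 ih2 =>
    have a1 : 0 < l1.length := List.length_pos_iff.mpr h1
    have a2 : 0 < l2.length := List.length_pos_iff.mpr h2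
    have hk : k = min l1.length l2.length / 2 := rfl
    have hlen : (l1.take (min l1.length l2.length / 2)).length
        = (l2.take (min l1.length l2.length / 2)).length := by
      simp only [List.length_take]; omega
    have hm' : ¬ min l1.length l2.length = 1 := hm
    rw [hk] at ih1 ih2
    rw [pvGo]
    simp only [dif_neg h1, dif_neg h2, dif_neg hm', ih1, ih2]
    rw [← pvLoopA_append (l1.take _) (l2.take _) (l1.drop _) (l2.drop _) hlen,
      List.take_append_drop, List.take_append_drop]

-- ===== VERDICT (by name: the statement is the Claim_ definition above) =====
theorem simple_diff_spec : Claim_equal_simple_diff := by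
  intro f1 f2 n1 n2 _
  unfold Spec_simple_diff simple_diff simple_diff_alt
  rw [pvGo_eq]
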